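-- pv_equiv track=rewrite | github.com/LazyKoalaMan/COSC-4315-Group-Repo | Assignment_2_Set_Operations/mypython.py | occurrenceCounter
-- ===== SOURCE A (Python) =====
-- def occurrenceCounter(listX, elemToCheck, size) :
--     if size < 1 :
--         return 0
--     else :
--         if listX[size - 1] == elemToCheck :
--             return 1 + occurrenceCounter(listX, elemToCheck, size - 1)
--         else :
--             return 0 + occurrenceCounter(listX, elemToCheck, size - 1)
-- ===== SOURCE B (Python) =====
-- def occurrenceCounter(listX, elemToCheck, size):
--     count = 0
--     for i in range(size):
--         if listX[i] == elemToCheck: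
--             count += 1
--     return count
-- ===== Notes on version B (the rewrite author's own statement) =====
-- stated objective: idiomatic
-- what changed: Replaces the top-down recursion (one Python stack frame per prefix element, which hits the recursion limit on long prefixes) with a plain iterative counting loop over range(size).
import Mathlib
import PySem

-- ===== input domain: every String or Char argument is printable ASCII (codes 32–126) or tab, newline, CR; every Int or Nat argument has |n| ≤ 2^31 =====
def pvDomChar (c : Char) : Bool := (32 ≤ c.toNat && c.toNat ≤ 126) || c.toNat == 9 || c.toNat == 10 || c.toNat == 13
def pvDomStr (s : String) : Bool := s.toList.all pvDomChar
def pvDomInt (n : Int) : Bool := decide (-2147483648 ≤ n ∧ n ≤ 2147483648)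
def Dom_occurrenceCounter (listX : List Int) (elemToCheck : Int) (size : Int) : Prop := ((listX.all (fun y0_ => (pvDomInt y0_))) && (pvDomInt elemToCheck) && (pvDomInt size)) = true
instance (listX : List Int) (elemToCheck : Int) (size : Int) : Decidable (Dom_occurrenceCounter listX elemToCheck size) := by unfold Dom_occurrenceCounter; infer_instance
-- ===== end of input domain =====

-- B replaces A's top-down recursion by an iterative counting loop over range(size) (idiomatic; O(1) space instead of O(n) Python stack).

-- ===== PORT A =====
-- literal transliteration of A's recursion; listX[size-1] ported as pyGetD (total form, exact under Pre_)
def occurrenceCounter (listX : List Int) (elemToCheck : Int) (size : Int) : Int :=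
  if size < 1 then 0
  else
    if PySem.List.pyGetD listX (size - 1) 0 == elemToCheck then
      1 + occurrenceCounter listX elemToCheck (size - 1)
    else
      0 + occurrenceCounter listX elemToCheck (size - 1)
termination_by size.toNat
decreasing_by all_goals omega

-- ===== PORT B =====
-- B: count = 0; for i in range(size): if listX[i] == elemToCheck: count += 1
def occurrenceCounter_alt (listX : List Int) (elemToCheck : Int) (size : Int) : Int :=
  (PySem.List.pyRange 0 size 1).foldl
    (fun count i => if PySem.List.pyGetD listX i 0 == elemToCheck then count + 1 else count) 0

-- ===== PRECONDITION & SPEC =====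
-- Pre_ excludes exactly the inputs where Python A (and Python B alike) raises IndexError: size > len(listX).
def Pre_occurrenceCounter (listX : List Int) (elemToCheck : Int) (size : Int) : Prop :=
  size ≤ (listX.length : Int)
instance (listX : List Int) (elemToCheck : Int) (size : Int) : Decidable (Pre_occurrenceCounter listX elemToCheck size) := by unfold Pre_occurrenceCounter; infer_instance
def pvWitness_occurrenceCounter : List Int × Int × Int := ([1, 2, 1], 1, 3)

def Spec_occurrenceCounter (listX : List Int) (elemToCheck : Int) (size : Int) (out : Int) : Prop := out = occurrenceCounter_alt listX elemToCheck size
instance (listX : List Int) (elemToCheck : Int) (size : Int) (out : Int) : Decidable (Spec_occurrenceCounter listX elemToCheck size out) := by unfold Spec_occurrenceCounter; infer_instance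

-- ===== CLAIM (what is proved, stated in full; the proofs are below) =====
def Claim_equal_occurrenceCounter : Prop := ∀ (listX : List Int) (elemToCheck : Int) (size : Int), Dom_occurrenceCounter listX elemToCheck size → Pre_occurrenceCounter listX elemToCheck size → Spec_occurrenceCounter listX elemToCheck size (occurrenceCounter listX elemToCheck size)

-- ===== LEMMAS AND PROOFS =====

-- On a natural-number prefix length the recursion and the fold agree (the two
-- programs inspect the same indices 0..n-1, in opposite orders).
theorem occ_nat_eq (listX : List Int) (e : Int) (n : Nat) :
    occurrenceCounter listX e (n : Int) = occurrenceCounter_alt listX e (n : Int) := by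
  induction n with
  | zero =>
      simp [occurrenceCounter, occurrenceCounter_alt, PySem.List.pyRange_one_eq_nil]
  | succ n ih =>
      have h1 : ¬ ((n + 1 : Nat) : Int) < 1 := by omega
      have h2 : ((n + 1 : Nat) : Int) - 1 = (n : Int) := by push_cast; ring
      have h3 : PySem.List.pyRange 0 ((n + 1 : Nat) : Int) 1
          = PySem.List.pyRange 0 (n : Int) 1 ++ [(n : Int)] := by
        have := PySem.List.pyRange_one_succ_right (a := 0) (b := (n : Int)) (by omega)
        push_cast
        push_cast at this
        exact this
      rw [occurrenceCounter, if_neg h1, h2, ih]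
      unfold occurrenceCounter_alt
      rw [h3, List.foldl_append]
      simp only [List.foldl]
      split <;> omega

theorem occ_eq (listX : List Int) (e : Int) (size : Int) :
    occurrenceCounter listX e size = occurrenceCounter_alt listX e size := by
  by_cases h : size < 1
  · rw [occurrenceCounter, if_pos h]
    unfold occurrenceCounter_alt
    rw [PySem.List.pyRange_one_eq_nil (by omega)]
    rfl
  · have : size = ((size.toNat : Nat) : Int) := by omega
    rw [this]
    exact occ_nat_eq listX e size.toNat

-- ===== VERDICT (by name: the statement is the Claim_ definition above) =====
theorem occurrenceCounter_spec : Claim_equal_occurrenceCounter := by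
  intro listX e size _ _
  exact occ_eq listX e size
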